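-- pv_equiv track=rewrite | github.com/robertmattmueller/sdac-compiler | pddl_parser/cost_node.py | make_parsable
-- ===== SOURCE A (Python) =====
-- def make_parsable(function):
--     ret_function = ""
--     part = ""
--     for i in range(0, len(function)):
--         if function[i] == "[":
--             if part != "":
--                 ret_function += "'" + part + "'," + function[i]
--             else:
--                 ret_function += function[i]
--             part = ""
--         elif function[i] == "]":
--             if part != "":
--                 ret_function += "'" + part + "'" + function[i]
--             else:
--                 ret_function += function[i]
--             if i + 1 < len(function):
--                     if function[i + 1] != "]":
--                         ret_function += ","
--             part = ""
--         else:
--             part += function[i]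
--     if part != "":
--         ret_function += "'" + part + "'"
--     return ret_function
-- ===== SOURCE B (Python) =====
-- def make_parsable(function):
--     # Two-phase: tokenize into brackets and maximal text runs, then emit with token lookahead.
--     tokens = []
--     run = ""
--     for ch in function:
--         if ch in "[]":
--             if run:
--                 tokens.append(run)
--                 run = ""
--             tokens.append(ch)
--         else:
--             run += ch
--     if run:
--         tokens.append(run)
--     out = []
--     n = len(tokens)
--     for i, tok in enumerate(tokens):
--         if tok == "[":
--             out.append("[")
--         elif tok == "]":
--             out.append("]")
--             if i + 1 < n and tokens[i + 1] != "]":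
--                 out.append(",")
--         else:
--             out.append("'" + tok + "'")
--             if i + 1 < n and tokens[i + 1] == "[":
--                 out.append(",")
--     return "".join(out)
-- ===== Notes on version B (the rewrite author's own statement) =====
-- stated objective: alternative
-- what changed: Replaces A's single per-character loop with stateful part/lookahead bookkeeping by a two-phase pipeline: tokenize into brackets and maximal text runs, then emit token-by-token with token lookahead deciding the commas, collecting pieces in a list joined once.
import Mathlib
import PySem

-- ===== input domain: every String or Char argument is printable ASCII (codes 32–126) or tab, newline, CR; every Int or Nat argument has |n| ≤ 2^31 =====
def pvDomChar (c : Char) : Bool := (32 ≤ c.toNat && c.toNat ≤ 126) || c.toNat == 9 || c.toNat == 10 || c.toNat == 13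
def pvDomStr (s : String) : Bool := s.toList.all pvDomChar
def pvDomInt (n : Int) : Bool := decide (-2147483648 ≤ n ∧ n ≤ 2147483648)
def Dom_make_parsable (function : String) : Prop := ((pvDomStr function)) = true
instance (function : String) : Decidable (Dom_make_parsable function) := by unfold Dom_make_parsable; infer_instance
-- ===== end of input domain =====

-- B replaces A's per-character loop with a tokenize-then-emit two-phase pipeline (objective: alternative; a timing run measured B faster by a constant factor).

-- ===== PORT A =====
-- A's loop over i in range(len(function)) with the lookahead function[i+1] is transcribed as
-- structural recursion on the character list: the current char is the head, function[i+1] is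
-- the head of the remaining characters — exact for every input.
-- 'if i + 1 < len(function): if function[i+1] != "]": ret_function += ","'
def lookA : List Char → List Char
  | d :: _ => if d ≠ ']' then [','] else []
  | [] => []

def goA : List Char → List Char → List Char → List Char
  | acc, part, [] => acc ++ (if part ≠ [] then '\'' :: part ++ ['\''] else [])
  | acc, part, c :: rest =>
    if c = '[' then
      goA (acc ++ (if part ≠ [] then '\'' :: part ++ ['\'', ','] else []) ++ ['[']) [] rest
    else if c = ']' then
      goA (acc ++ (if part ≠ [] then '\'' :: part ++ ['\''] else []) ++ [']'] ++ lookA rest) [] rest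
    else
      goA acc (part ++ [c]) rest

def make_parsable (function : String) : String :=
  String.ofList (goA [] [] function.toList)

-- ===== PORT B =====
-- phase 1 of Source B: split into tokens, each "[" or "]" or a maximal non-bracket run
def tokB : List Char → List Char → List (List Char)
  | run, [] => if run ≠ [] then [run] else []
  | run, c :: rest =>
    if c = '[' ∨ c = ']' then
      (if run ≠ [] then [run] else []) ++ [[c]] ++ tokB [] rest
    else
      tokB (run ++ [c]) rest

-- phase 2 of Source B: emit each token, deciding commas by looking at the next token
-- 'if i + 1 < n and tokens[i + 1] != "]": out.append(",")'
def lookB : List (List Char) → List Char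
  | u :: _ => if u ≠ [']'] then [','] else []
  | [] => []

def emitB : List (List Char) → List Char
  | [] => []
  | t :: rest =>
    (if t = ['['] then ['[']
     else if t = [']'] then
       [']'] ++ lookB rest
     else '\'' :: t ++ ['\''] ++ (match rest with
                                  | u :: _ => if u = ['['] then [','] else []
                                  | [] => []))
    ++ emitB rest

def make_parsable_alt (function : String) : String :=
  String.ofList (emitB (tokB [] function.toList))

-- ===== PRECONDITION & SPEC =====
def Spec_make_parsable (function : String) (out : String) : Prop := out = make_parsable_alt function
instance (function : String) (out : String) : Decidable (Spec_make_parsable function out) := by unfold Spec_make_parsable; infer_instance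

-- ===== CLAIM (what is proved, stated in full; the proofs are below) =====
def Claim_equal_make_parsable : Prop := ∀ (function : String), Dom_make_parsable function → Spec_make_parsable function (make_parsable function)

-- ===== LEMMAS AND PROOFS =====

-- the first token produced from a running nonempty text run starts with that run's first char
theorem tokB_head (rest : List Char) : ∀ (c : Char) (run : List Char), c ≠ '[' → c ≠ ']' →
    ∃ s ts, tokB (c :: run) rest = (c :: s) :: ts := by
  induction rest with
  | nil => intro c run _ _; exact ⟨run, [], by simp [tokB]⟩
  | cons d rest ih =>
    intro c run hc1 hc2
    by_cases hd : d = '[' ∨ d = ']'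
    · exact ⟨run, [d] :: tokB [] rest, by simp [tokB, hd]⟩
    · simp only [not_or] at hd
      obtain ⟨s, ts, h⟩ := ih c (run ++ [d]) hc1 hc2
      exact ⟨s, ts, by simpa [tokB, hd.1, hd.2] using h⟩

theorem goA_eq (cs : List Char) : ∀ (part acc : List Char),
    '[' ∉ part → ']' ∉ part → goA acc part cs = acc ++ emitB (tokB part cs) := by
  induction cs with
  | nil =>
    intro part acc h1 h2
    match part, h1, h2 with
    | [], _, _ => simp [goA, tokB, emitB]
    | p :: ps, h1, h2 =>
      simp only [List.mem_cons, not_or] at h1 h2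
      have hA : p :: ps ≠ ['['] := fun h => h1.1 (by injection h with he; exact he.symm)
      have hB : p :: ps ≠ [']'] := fun h => h2.1 (by injection h with he; exact he.symm)
      simp [goA, tokB, emitB, hA, hB]
  | cons c rest ih =>
    intro part acc h1 h2
    by_cases hc1 : c = '['
    · subst hc1
      have lhs : goA acc part ('[' :: rest) =
          (acc ++ ((if part ≠ [] then '\'' :: part ++ ['\'', ','] else []) ++ ['['])) ++
            emitB (tokB [] rest) := by
        rw [show goA acc part ('[' :: rest) =
            goA (acc ++ (if part ≠ [] then '\'' :: part ++ ['\'', ','] else []) ++ ['[']) [] rest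
            from rfl, ih [] _ (by simp) (by simp)]
        simp
      rw [lhs, show tokB part ('[' :: rest) =
          (if part ≠ [] then [part] else []) ++ [['[']] ++ tokB [] rest from rfl]
      match part, h1, h2 with
      | [], _, _ => simp [emitB]
      | p :: ps, h1, h2 =>
        simp only [List.mem_cons, not_or] at h1 h2
        have hA : p :: ps ≠ ['['] := fun h => h1.1 (by injection h with he; exact he.symm)
        have hB : p :: ps ≠ [']'] := fun h => h2.1 (by injection h with he; exact he.symm)
        simp [emitB, hA, hB]
    · by_cases hc2 : c = ']'
      · subst hc2
        have hla : lookA rest = lookB (tokB [] rest) := by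
          match rest with
          | [] => simp [tokB, lookA, lookB]
          | d :: rest' =>
            by_cases hd : d = '[' ∨ d = ']'
            · rcases hd with rfl | rfl
              · simp [tokB, lookA, lookB]
              · simp [tokB, lookA, lookB]
            · simp only [not_or] at hd
              rw [show tokB [] (d :: rest') = tokB [d] rest' by simp [tokB, hd.1, hd.2]]
              obtain ⟨s, ts, h⟩ := tokB_head rest' d [] hd.1 hd.2
              rw [h]
              have hds : d :: s ≠ [']'] := by simp [hd.2]
              simp [lookA, lookB, hd.2, hds]
        have lhs : goA acc part (']' :: rest) =
            (acc ++ ((if part ≠ [] then '\'' :: part ++ ['\''] else []) ++ [']'] ++ lookA rest)) ++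
              emitB (tokB [] rest) := by
          rw [show goA acc part (']' :: rest) =
              goA (acc ++ (if part ≠ [] then '\'' :: part ++ ['\''] else []) ++ [']'] ++
                lookA rest) [] rest from rfl, ih [] _ (by simp) (by simp)]
          simp
        rw [lhs, show tokB part (']' :: rest) =
            (if part ≠ [] then [part] else []) ++ [[']']] ++ tokB [] rest from rfl]
        match part, h1, h2 with
        | [], _, _ => simp [emitB, hla]
        | p :: ps, h1, h2 =>
          simp only [List.mem_cons, not_or] at h1 h2
          have hA : p :: ps ≠ ['['] := fun h => h1.1 (by injection h with he; exact he.symm)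
          have hB : p :: ps ≠ [']'] := fun h => h2.1 (by injection h with he; exact he.symm)
          simp [emitB, hla, hA, hB]
      · have lhs : goA acc part (c :: rest) = goA acc (part ++ [c]) rest := by
          simp [goA, hc1, hc2]
        rw [lhs, ih (part ++ [c]) acc (by simp [h1, Ne.symm hc1]) (by simp [h2, Ne.symm hc2]),
          show tokB part (c :: rest) = tokB (part ++ [c]) rest from by simp [tokB, hc1, hc2]]

-- ===== VERDICT (by name: the statement is the Claim_ definition above) =====
theorem make_parsable_spec : Claim_equal_make_parsable := by
  intro function _
  unfold Spec_make_parsable make_parsable make_parsable_alt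
  rw [goA_eq _ [] [] (by simp) (by simp), List.nil_append]
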